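-- pv_equiv track=rewrite | github.com/HrvojeHemetek/Diplomski-rad | lcu_optimizer.py | _pauli_to_symplectic
-- ===== SOURCE A (Python) =====
-- from typing import List, Tuple, Dict, Optional, Set
--
-- def _pauli_to_symplectic(pauli_label: str) -> Tuple[int, int]:
--
--     x_mask = 0
--     z_mask = 0
--
--     for i, char in enumerate(reversed(pauli_label)):
--         if char == 'X':
--             x_mask |= (1 << i)
--         elif char == 'Z':
--             z_mask |= (1 << i)
--         elif char == 'Y':
--             x_mask |= (1 << i)
--             z_mask |= (1 << i)
--
--     return x_mask, z_mask
-- ===== SOURCE B (Python) =====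
-- def _pauli_to_symplectic(pauli_label: str):
--     # Horner accumulation left-to-right: no reversal, no enumerate, no bit shifts.
--     x = 0
--     z = 0
--     for ch in pauli_label:
--         x = 2 * x + (1 if ch in 'XY' else 0)
--         z = 2 * z + (1 if ch in 'ZY' else 0)
--     return x, z
-- ===== Notes on version B (the rewrite author's own statement) =====
-- stated objective: simpler
-- what changed: Replaces the reversed-enumerate loop that ORs shifted bit masks (1 << i) with a single left-to-right Horner pass that doubles two accumulators and adds the per-character bit, eliminating reversed(), enumerate() and all shift/or operations.
import Mathlib
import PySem

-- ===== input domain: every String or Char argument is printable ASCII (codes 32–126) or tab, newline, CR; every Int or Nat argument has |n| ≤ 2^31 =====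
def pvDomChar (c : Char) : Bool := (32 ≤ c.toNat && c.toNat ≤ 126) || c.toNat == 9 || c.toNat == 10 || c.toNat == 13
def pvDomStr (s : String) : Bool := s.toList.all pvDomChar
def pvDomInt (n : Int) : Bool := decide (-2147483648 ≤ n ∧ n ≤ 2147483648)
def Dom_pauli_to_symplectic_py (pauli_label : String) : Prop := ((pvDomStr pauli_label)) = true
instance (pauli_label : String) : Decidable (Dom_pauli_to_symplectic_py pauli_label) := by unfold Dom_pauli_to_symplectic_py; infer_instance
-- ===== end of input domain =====

-- B replaces A's reversed-enumerate bitmask loop by a single left-to-right Horner pass (simpler).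

-- ===== PORT A =====
-- Python `1 << i` on the nonnegative enumerate index i : Int is ported as (1 : Int) <<< i
-- (Mathlib's Int shift; exact for nonnegative i), `|=` as Int.lor (exact on these values).
def pauli_to_symplectic_py (pauli_label : String) : Int × Int :=
  (PySem.List.enumerate pauli_label.toList.reverse 0).foldl
    (fun (acc : Int × Int) (p : Int × Char) =>
      if p.2 = 'X' then (Int.lor acc.1 ((1 : Int) <<< p.1), acc.2)
      else if p.2 = 'Z' then (acc.1, Int.lor acc.2 ((1 : Int) <<< p.1))
      else if p.2 = 'Y' then (Int.lor acc.1 ((1 : Int) <<< p.1), Int.lor acc.2 ((1 : Int) <<< p.1))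
      else acc)
    (0, 0)

-- ===== PORT B =====
-- `ch in 'XY'` (membership in a two-character literal) is ported as the disjunction c = 'X' ∨ c = 'Y'.
def pauli_to_symplectic_py_alt (pauli_label : String) : Int × Int :=
  pauli_label.toList.foldl
    (fun (acc : Int × Int) (c : Char) =>
      (2 * acc.1 + (if c = 'X' ∨ c = 'Y' then 1 else 0),
       2 * acc.2 + (if c = 'Z' ∨ c = 'Y' then 1 else 0)))
    (0, 0)

-- ===== PRECONDITION & SPEC =====
def Spec_pauli_to_symplectic_py (pauli_label : String) (out : Int × Int) : Prop := out = pauli_to_symplectic_py_alt pauli_label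
instance (pauli_label : String) (out : Int × Int) : Decidable (Spec_pauli_to_symplectic_py pauli_label out) := by unfold Spec_pauli_to_symplectic_py; infer_instance

-- ===== CLAIM (what is proved, stated in full; the proofs are below) =====
def Claim_equal_pauli_to_symplectic_py : Prop := ∀ (pauli_label : String), Dom_pauli_to_symplectic_py pauli_label → Spec_pauli_to_symplectic_py pauli_label (pauli_to_symplectic_py pauli_label)

-- ===== LEMMAS AND PROOFS =====

/-- x-bit of a character. -/
def pvFx (c : Char) : Nat := if c = 'X' ∨ c = 'Y' then 1 else 0

/-- z-bit of a character. -/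
def pvFz (c : Char) : Nat := if c = 'Z' ∨ c = 'Y' then 1 else 0

/-- Little-endian value of a bit list (head = bit 0). -/
def pvW (f : Char → Nat) : List Char → Nat
  | [] => 0
  | c :: t => f c + 2 * pvW f t

theorem pvW_append (f : Char → Nat) (u v : List Char) :
    pvW f (u ++ v) = pvW f u + 2 ^ u.length * pvW f v := by
  induction u with
  | nil => simp [pvW]
  | cons c t ih => simp [pvW, ih, pow_succ]; ring

theorem pv_shift_one (n : Nat) : (1 : Int) <<< ((n : Nat) : Int) = ((2 ^ n : Nat) : Int) := by
  show Int.ofNat (Nat.shiftLeft' false 1 n) = _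
  rw [Nat.shiftLeft'_false, Nat.one_shiftLeft]
  rfl

theorem pv_lor_natCast (a b : Nat) : Int.lor (a : Int) (b : Int) = ((a ||| b : Nat) : Int) := rfl

theorem pv_or_two_pow {a n : Nat} (h : a < 2 ^ n) : a ||| 2 ^ n = a + 2 ^ n := by
  have h1 := Nat.two_pow_add_eq_or_of_lt h 1
  simpa [Nat.lor_comm, Nat.add_comm] using h1.symm

/-- Invariant for A's fold over the enumerated reversed list. -/
theorem pvA_gen (r : List Char) : ∀ (n x z : Nat), x < 2 ^ n → z < 2 ^ n →
    (PySem.List.enumerate r (n : Int)).foldl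
      (fun (acc : Int × Int) (p : Int × Char) =>
        if p.2 = 'X' then (Int.lor acc.1 ((1 : Int) <<< p.1), acc.2)
        else if p.2 = 'Z' then (acc.1, Int.lor acc.2 ((1 : Int) <<< p.1))
        else if p.2 = 'Y' then (Int.lor acc.1 ((1 : Int) <<< p.1), Int.lor acc.2 ((1 : Int) <<< p.1))
        else acc)
      ((x : Int), (z : Int))
    = (((x + 2 ^ n * pvW pvFx r : Nat) : Int), ((z + 2 ^ n * pvW pvFz r : Nat) : Int)) := by
  induction r with
  | nil => intro n x z hx hz; simp [PySem.List.enumerate, pvW]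
  | cons c t ih =>
    intro n x z hx hz
    have hcast : ((n : Int) + 1) = (((n + 1 : Nat) : Nat) : Int) := by push_cast; ring
    have hlt : ∀ {a : Nat}, a < 2 ^ n → a + 2 ^ n < 2 ^ (n + 1) := by
      intro a ha; rw [pow_succ]; omega
    rw [PySem.List.enumerate_cons]
    by_cases hX : c = 'X'
    · subst hX
      simp only [List.foldl_cons, Char.reduceEq, reduceIte, pv_shift_one, pv_lor_natCast,
        pv_or_two_pow hx, hcast]
      rw [ih (n + 1) (x + 2 ^ n) z (hlt hx) (lt_of_lt_of_le hz (by rw [pow_succ]; omega))]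
      have h1 : pvFx 'X' = 1 := rfl
      have h2 : pvFz 'X' = 0 := rfl
      simp only [pvW, h1, h2, pow_succ, Prod.mk.injEq, Nat.cast_inj]
      constructor <;> ring
    · by_cases hZ : c = 'Z'
      · subst hZ
        simp only [List.foldl_cons, Char.reduceEq, reduceIte, pv_shift_one, pv_lor_natCast,
          pv_or_two_pow hz, hcast]
        rw [ih (n + 1) x (z + 2 ^ n) (lt_of_lt_of_le hx (by rw [pow_succ]; omega)) (hlt hz)]
        have h1 : pvFx 'Z' = 0 := rfl
        have h2 : pvFz 'Z' = 1 := rfl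
        simp only [pvW, h1, h2, pow_succ, Prod.mk.injEq, Nat.cast_inj]
        constructor <;> ring
      · by_cases hY : c = 'Y'
        · subst hY
          simp only [List.foldl_cons, Char.reduceEq, reduceIte, pv_shift_one, pv_lor_natCast,
            pv_or_two_pow hx, pv_or_two_pow hz, hcast]
          rw [ih (n + 1) (x + 2 ^ n) (z + 2 ^ n) (hlt hx) (hlt hz)]
          have h1 : pvFx 'Y' = 1 := rfl
          have h2 : pvFz 'Y' = 1 := rfl
          simp only [pvW, h1, h2, pow_succ, Prod.mk.injEq, Nat.cast_inj]
          constructor <;> ring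
        · simp only [List.foldl_cons, if_neg hX, if_neg hZ, if_neg hY, hcast]
          rw [ih (n + 1) x z (lt_of_lt_of_le hx (by rw [pow_succ]; omega))
            (lt_of_lt_of_le hz (by rw [pow_succ]; omega))]
          have h1 : pvFx c = 0 := by simp [pvFx, hX, hY]
          have h2 : pvFz c = 0 := by simp [pvFz, hZ, hY]
          simp only [pvW, h1, h2, pow_succ, Prod.mk.injEq, Nat.cast_inj]
          constructor <;> ring

/-- Invariant for B's Horner fold. -/
theorem pvB_gen (l : List Char) : ∀ (x z : Int),
    l.foldl
      (fun (acc : Int × Int) (c : Char) =>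
        (2 * acc.1 + (if c = 'X' ∨ c = 'Y' then 1 else 0),
         2 * acc.2 + (if c = 'Z' ∨ c = 'Y' then 1 else 0)))
      (x, z)
    = (x * 2 ^ l.length + ((pvW pvFx l.reverse : Nat) : Int),
       z * 2 ^ l.length + ((pvW pvFz l.reverse : Nat) : Int)) := by
  induction l with
  | nil => intro x z; simp [pvW]
  | cons c t ih =>
    intro x z
    rw [List.foldl_cons, ih]
    have hx : (if c = 'X' ∨ c = 'Y' then (1 : Int) else 0) = ((pvFx c : Nat) : Int) := by
      by_cases h : c = 'X' ∨ c = 'Y' <;> simp [pvFx, h]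
    have hz : (if c = 'Z' ∨ c = 'Y' then (1 : Int) else 0) = ((pvFz c : Nat) : Int) := by
      by_cases h : c = 'Z' ∨ c = 'Y' <;> simp [pvFz, h]
    simp only [hx, hz, List.reverse_cons, pvW_append, List.length_reverse, List.length_cons,
      pvW, Prod.mk.injEq]
    push_cast
    constructor <;> ring

-- ===== VERDICT (by name: the statement is the Claim_ definition above) =====
theorem pauli_to_symplectic_py_spec : Claim_equal_pauli_to_symplectic_py := by
  intro s _
  unfold Spec_pauli_to_symplectic_py pauli_to_symplectic_py pauli_to_symplectic_py_alt
  have hA := pvA_gen s.toList.reverse 0 0 0 (by norm_num) (by norm_num)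
  have hB := pvB_gen s.toList 0 0
  simp only [Nat.cast_zero] at hA
  rw [hA, hB]
  simp
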